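-- pv_equiv track=rewrite | github.com/unabl4/codefights | snow_clearing/snow_clearing.py | snowClearing
-- ===== SOURCE A (Python) =====
-- MAX = 100001 # max index
--
-- def snowClearing(queries):
--     s = 0 # total sum
--     nz_indices = set([MAX]) # non-zero, 10^5+1
--     v = [0] * (MAX+1)
--     v[MAX] = 1
--     for query in queries:
--         if query[0] == 1:
--             # insert
--             v[query[1]] += query[2]
--             if v[query[1]] != 0: # non-zero?
--                 nz_indices.add(query[1])
--             elif query[1] in nz_indices:
--                 nz_indices.remove(query[1])
--         elif query[0] == 0:
--             j = -1
--             for i in nz_indices: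
--                 if i >= query[1] and v[i] != 0 and (j == -1 or i < j):
--                     j = i
--
--             # assert j != -1
--             s += j
--
--     return s
-- ===== SOURCE B (Python) =====
-- # B: instead of a 100002-cell array plus an unordered set scanned in full for
-- # every sum-query, keep a dict of current values and a sorted list of the
-- # nonzero indices (with the same 100001 sentinel); a sum-query takes the first
-- # list element >= x, updates splice the sorted list in place.
-- def snowClearing(queries):
--     s = 0
--     vals = {}          # index -> current value (default 0)
--     nz = [100001]      # sorted ascending: exactly the nonzero indices + sentinel
--     for q in queries:
--         if q[0] == 1:
--             i = q[1]
--             old = vals.get(i, 0)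
--             new = old + q[2]
--             vals[i] = new
--             if old == 0 and new != 0:
--                 k = 0
--                 while nz[k] < i:
--                     k += 1
--                 nz.insert(k, i)
--             elif old != 0 and new == 0:
--                 nz.remove(i)
--         elif q[0] == 0:
--             x = q[1]
--             ans = -1
--             for i in nz:
--                 if i >= x:
--                     ans = i
--                     break
--             s += ans
--     return s
-- ===== Notes on version B (the rewrite author's own statement) =====
-- stated objective: alternative
-- what changed: B drops A's 100002-cell value array and unordered nonzero-index set scanned in full for every sum query, and instead keeps a value dict plus a sorted list of the nonzero indices: a sum query returns the first list element >= x (early exit) and updates splice the sorted list in place.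
-- outside the precondition, e.g. on snowClearing([[1, 100001, -1], [0, 0]]): A returns -1, B returns 100001; on snowClearing([[1, -1, -1], [0, 0]]): A returns -1, B returns 100001
import Mathlib
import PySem

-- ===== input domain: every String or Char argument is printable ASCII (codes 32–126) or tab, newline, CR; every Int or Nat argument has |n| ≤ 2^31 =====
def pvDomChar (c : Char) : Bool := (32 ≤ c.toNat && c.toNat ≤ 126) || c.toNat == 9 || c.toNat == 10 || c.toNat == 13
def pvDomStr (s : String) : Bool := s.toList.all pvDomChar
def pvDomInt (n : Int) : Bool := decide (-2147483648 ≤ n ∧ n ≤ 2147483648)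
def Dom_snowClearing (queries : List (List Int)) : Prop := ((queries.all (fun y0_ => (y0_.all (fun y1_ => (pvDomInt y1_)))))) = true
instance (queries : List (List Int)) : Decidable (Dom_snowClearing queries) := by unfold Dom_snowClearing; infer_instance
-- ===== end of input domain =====

-- B replaces A's 100002-cell array plus a full scan of an unordered index set per sum-query
-- by a value dict plus a sorted list of the nonzero indices, answered by its first element ≥ x
-- (objective: alternative).

-- ===== PORT A =====
-- the body of A's inner 'for i in nz_indices' loop (running minimum j, sentinel -1)
def pvScanStep (x : Int) (v : List Int) (j i : Int) : Int :=
  if i ≥ x ∧ PySem.List.pyGetD v i 0 ≠ 0 ∧ (j = -1 ∨ i < j) then i else j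

-- one iteration of A's main loop (state: running sum, nonzero-index set, value array)
def pvStepA (st : Int × PySem.Set Int × List Int) (query : List Int) : Int × PySem.Set Int × List Int :=
  match st with
  | (s, nz, v) =>
    if PySem.List.pyGetD query 0 0 = 1 then
      let i := PySem.List.pyGetD query 1 0
      let v' := PySem.List.pySetD v i (PySem.List.pyGetD v i 0 + PySem.List.pyGetD query 2 0)
      let nz' := if PySem.List.pyGetD v' i 0 ≠ 0 then PySem.Set.add nz i
        else if PySem.Set.contains nz i then (PySem.Set.remove? nz i).getD nz else nz
      (s, nz', v')
    else if PySem.List.pyGetD query 0 0 = 0 then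
      -- A's inner scan over the set; its value (minimum qualifying index, or -1) does not
      -- depend on the iteration order, so folding in the Set's stored order is exact
      (s + nz.foldl (pvScanStep (PySem.List.pyGetD query 1 0) v) (-1), nz, v)
    else (s, nz, v)

def snowClearing (queries : List (List Int)) : Int :=
  (queries.foldl pvStepA
    (0, PySem.Set.ofList [100001], PySem.List.pySetD (List.replicate 100002 0) 100001 1)).1

-- ===== PORT B =====
-- Source B's while-loop insertion into the sorted list (inside Pre_ the loop never falls off
-- the end: the sentinel 100001 is always present and larger than every inserted i)
def pvInsort (i : Int) : List Int → List Int
  | [] => [i]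
  | a :: t => if a < i then a :: pvInsort i t else i :: a :: t

-- Source B's early-exit scan: first element ≥ x of the sorted list, else -1
def pvSucc (x : Int) : List Int → Int
  | [] => -1
  | a :: t => if a ≥ x then a else pvSucc x t

-- one iteration of Source B's loop (state: running sum, value dict, sorted nonzero-index list)
def pvStepB (st : Int × PySem.Dict Int Int × List Int) (q : List Int) : Int × PySem.Dict Int Int × List Int :=
  match st with
  | (s, vals, nz) =>
    if PySem.List.pyGetD q 0 0 = 1 then
      let i := PySem.List.pyGetD q 1 0
      let old := vals.getD i 0
      let new := old + PySem.List.pyGetD q 2 0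
      let vals' := vals.insert i new
      let nz' := if old = 0 ∧ new ≠ 0 then pvInsort i nz
        else if old ≠ 0 ∧ new = 0 then (PySem.List.remove? nz i).getD nz
        else nz
      (s, vals', nz')
    else if PySem.List.pyGetD q 0 0 = 0 then
      (s + pvSucc (PySem.List.pyGetD q 1 0) nz, vals, nz)
    else (s, vals, nz)

def snowClearing_alt (queries : List (List Int)) : Int :=
  (queries.foldl pvStepB (0, PySem.Dict.empty, [100001])).1

-- ===== PRECONDITION & SPEC =====
-- Pre_ excludes malformed queries (empty, or too short for their tag — A raises IndexError)
-- and update queries whose index lies outside the natural board 0..100000: there A either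
-- raises IndexError (index out of range) or silently applies Python negative-index
-- wraparound / aliases its internal sentinel cell 100001, an artefact of A's array layout.
def Pre_snowClearing (queries : List (List Int)) : Prop :=
  ∀ q ∈ queries, q ≠ [] ∧
    (q.headI = 1 → 3 ≤ q.length ∧ 0 ≤ q.getD 1 0 ∧ q.getD 1 0 ≤ 100000) ∧
    (q.headI = 0 → 2 ≤ q.length)
instance (queries : List (List Int)) : Decidable (Pre_snowClearing queries) := by
  unfold Pre_snowClearing; infer_instance

def pvWitness_snowClearing : List (List Int) := [[1, 5, 3], [0, 0], [1, 5, -3], [0, 0]]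

def Spec_snowClearing (queries : List (List Int)) (out : Int) : Prop := out = snowClearing_alt queries
instance (queries : List (List Int)) (out : Int) : Decidable (Spec_snowClearing queries out) := by
  unfold Spec_snowClearing; infer_instance

-- ===== CLAIM (what is proved, stated in full; the proofs are below) =====
def Claim_equal_snowClearing : Prop := ∀ (queries : List (List Int)), Dom_snowClearing queries → Pre_snowClearing queries → Spec_snowClearing queries (snowClearing queries)

-- ===== LEMMAS AND PROOFS =====

-- indices with a nonzero current value (including the sentinel 100001, whose value stays 1)
def pvP (v : List Int) (i : Int) : Prop :=
  0 ≤ i ∧ i ≤ 100001 ∧ PySem.List.pyGetD v i 0 ≠ 0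

-- the coupling invariant between A's state and B's state
def pvInv (a : Int × PySem.Set Int × List Int) (b : Int × PySem.Dict Int Int × List Int) : Prop :=
  a.1 = b.1 ∧
  a.2.2.length = 100002 ∧
  (∀ i : Int, 0 ≤ i → i ≤ 100000 → PySem.List.pyGetD a.2.2 i 0 = b.2.1.getD i 0) ∧
  PySem.List.pyGetD a.2.2 100001 0 = 1 ∧
  (∀ i, i ∈ a.2.1 ↔ pvP a.2.2 i) ∧
  b.2.2.Pairwise (· < ·) ∧
  (∀ i, i ∈ b.2.2 ↔ pvP a.2.2 i)

lemma pvGet_set (v : List Int) (i j a : Int) (hi : 0 ≤ i)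
    (hj : 0 ≤ j) (hjl : j < v.length) :
    PySem.List.pyGetD (PySem.List.pySetD v i a) j 0 = if j = i then a else PySem.List.pyGetD v j 0 := by
  rw [PySem.List.pySetD_of_nonneg v a hi,
      PySem.List.pyGetD_eq_getElem (v.set i.toNat a) 0 hj (by simpa using hjl),
      List.getElem_set]
  split_ifs with h1 h2 h2
  · rfl
  · omega
  · omega
  · rw [PySem.List.pyGetD_eq_getElem v 0 hj hjl]

lemma pvP_set (v : List Int) (i new : Int) (hlen : v.length = 100002) (hi0 : 0 ≤ i)
    (hi1 : i ≤ 100001) (y : Int) :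
    pvP (PySem.List.pySetD v i new) y ↔ ((y = i ∧ new ≠ 0) ∨ (y ≠ i ∧ pvP v y)) := by
  have hvl : ((v.length : Nat) : Int) = 100002 := by rw [hlen]; norm_num
  by_cases hy : y = i
  · rw [pvP, pvGet_set v i y new hi0 (by omega) (by omega), if_pos hy]
    constructor
    · rintro ⟨-, -, h⟩; exact Or.inl ⟨hy, h⟩
    · rintro (⟨-, h⟩ | ⟨h, -⟩)
      · exact ⟨by omega, by omega, h⟩
      · exact absurd hy h
  · by_cases hb : 0 ≤ y ∧ y ≤ 100001
    · rw [pvP, pvGet_set v i y new hi0 hb.1 (by omega), if_neg hy]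
      unfold pvP; tauto
    · unfold pvP
      constructor
      · rintro ⟨h1, h2, -⟩; exact absurd ⟨h1, h2⟩ hb
      · rintro (⟨rfl, -⟩ | ⟨-, h1, h2, -⟩)
        · exact absurd rfl hy
        · exact absurd ⟨h1, h2⟩ hb

lemma mem_pvInsort (i x : Int) (l : List Int) : x ∈ pvInsort i l ↔ x = i ∨ x ∈ l := by
  induction l with
  | nil => simp [pvInsort]
  | cons a t ih =>
    simp only [pvInsort]
    split_ifs with h
    · simp only [List.mem_cons, ih]; tauto
    · simp

lemma pairwise_pvInsort (i : Int) (l : List Int) (h : l.Pairwise (· < ·)) (hi : i ∉ l) :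
    (pvInsort i l).Pairwise (· < ·) := by
  induction l with
  | nil => simp [pvInsort]
  | cons a t ih =>
    rw [List.pairwise_cons] at h
    simp only [pvInsort]
    split_ifs with hlt
    · refine List.pairwise_cons.2 ⟨?_, ih h.2 (fun hx => hi (by simp [hx]))⟩
      intro b hb
      rcases (mem_pvInsort i b t).1 hb with rfl | hbt
      · exact hlt
      · exact h.1 b hbt
    · have hne : i ≠ a := fun he => hi (by simp [he])
      refine List.pairwise_cons.2 ⟨?_, List.pairwise_cons.2 h⟩
      intro b hb
      rcases List.mem_cons.1 hb with rfl | hbt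
      · omega
      · have := h.1 b hbt; omega

lemma pvSucc_spec (x : Int) (l : List Int) (h : l.Pairwise (· < ·)) :
    (pvSucc x l = -1 ∧ ∀ i ∈ l, ¬ x ≤ i) ∨
    (pvSucc x l ∈ l ∧ x ≤ pvSucc x l ∧ ∀ i ∈ l, x ≤ i → pvSucc x l ≤ i) := by
  induction l with
  | nil => simp [pvSucc]
  | cons a t ih =>
    rw [List.pairwise_cons] at h
    simp only [pvSucc]
    split_ifs with ha
    · right
      refine ⟨by simp, ha, ?_⟩
      intro i hi _
      rcases List.mem_cons.1 hi with rfl | hit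
      · exact le_refl i
      · exact le_of_lt (h.1 i hit)
    · rcases ih h.2 with ⟨h1, h2⟩ | ⟨h1, h2, h3⟩
      · rw [h1]; left
        refine ⟨rfl, ?_⟩
        intro i hi
        rcases List.mem_cons.1 hi with rfl | hit
        · omega
        · exact h2 i hit
      · right
        refine ⟨by simp [h1], h2, ?_⟩
        intro i hi hxi
        rcases List.mem_cons.1 hi with rfl | hit
        · omega
        · exact h3 i hit hxi

lemma pvScanA_gen (x : Int) (v : List Int) (l : List Int) (hl : ∀ i ∈ l, 0 ≤ i) (j : Int) :
    (l.foldl (pvScanStep x v) j = j ∨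
     (l.foldl (pvScanStep x v) j ∈ l ∧ x ≤ l.foldl (pvScanStep x v) j ∧
      PySem.List.pyGetD v (l.foldl (pvScanStep x v) j) 0 ≠ 0)) ∧
    (∀ i ∈ l, x ≤ i → PySem.List.pyGetD v i 0 ≠ 0 →
      l.foldl (pvScanStep x v) j ≠ -1 ∧ l.foldl (pvScanStep x v) j ≤ i) ∧
    (j ≠ -1 → l.foldl (pvScanStep x v) j ≠ -1 ∧ l.foldl (pvScanStep x v) j ≤ j) := by
  induction l generalizing j with
  | nil => simp
  | cons a t ih =>
    have ha0 : 0 ≤ a := hl a (by simp)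
    have hlt : ∀ i ∈ t, 0 ≤ i := fun i hi => hl i (by simp [hi])
    simp only [List.foldl_cons]
    by_cases hc : a ≥ x ∧ PySem.List.pyGetD v a 0 ≠ 0 ∧ (j = -1 ∨ a < j)
    · rw [show pvScanStep x v j a = a from by rw [pvScanStep, if_pos hc]]
      obtain ⟨ih1, ih2, ih3⟩ := ih hlt a
      have hane : a ≠ -1 := by omega
      have h3 := ih3 hane
      refine ⟨?_, ?_, ?_⟩
      · rcases ih1 with he | ⟨hm, hx2, hv2⟩
        · right; exact ⟨by simp [he], by rw [he]; exact hc.1, by rw [he]; exact hc.2.1⟩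
        · right; exact ⟨by simp [hm], hx2, hv2⟩
      · intro i hi hxi hvi
        rcases List.mem_cons.1 hi with rfl | hit
        · exact ⟨h3.1, h3.2⟩
        · exact ih2 i hit hxi hvi
      · intro hj
        rcases hc.2.2 with rfl | haj
        · omega
        · exact ⟨h3.1, le_trans h3.2 (le_of_lt haj)⟩
    · rw [show pvScanStep x v j a = j from by rw [pvScanStep, if_neg hc]]
      obtain ⟨ih1, ih2, ih3⟩ := ih hlt j
      refine ⟨?_, ?_, ?_⟩
      · rcases ih1 with he | ⟨hm, hx2, hv2⟩
        · left; exact he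
        · right; exact ⟨by simp [hm], hx2, hv2⟩
      · intro i hi hxi hvi
        rcases List.mem_cons.1 hi with rfl | hit
        · have hnd : ¬(j = -1 ∨ i < j) := fun hd => hc ⟨hxi, hvi, hd⟩
          have hj1 : j ≠ -1 := fun he => hnd (Or.inl he)
          have h3 := ih3 hj1
          exact ⟨h3.1, le_trans h3.2 (by omega)⟩
        · exact ih2 i hit hxi hvi
      · exact ih3

-- the two query answers coincide: A's full scan and B's first-element-≥-x both compute
-- the least nonzero index ≥ x, or -1 if there is none
lemma pvScan_eq (x : Int) (v : List Int) (nz nzB : List Int)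
    (hA : ∀ i, i ∈ nz ↔ pvP v i) (hBs : nzB.Pairwise (· < ·))
    (hB : ∀ i, i ∈ nzB ↔ pvP v i) :
    nz.foldl (pvScanStep x v) (-1) = pvSucc x nzB := by
  have hl : ∀ i ∈ nz, 0 ≤ i := fun i hi => ((hA i).1 hi).1
  obtain ⟨a1, a2, _⟩ := pvScanA_gen x v nz hl (-1)
  rcases pvSucc_spec x nzB hBs with ⟨b1, b2⟩ | ⟨b1, b2, b3⟩
  · rw [b1]
    rcases a1 with he | ⟨hm, hx2, _⟩
    · exact he
    · exact absurd hx2 (b2 _ ((hB _).2 ((hA _).1 hm)))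
  · have hmP : pvP v (pvSucc x nzB) := (hB _).1 b1
    have hmA : pvSucc x nzB ∈ nz := (hA _).2 hmP
    have h2 := a2 _ hmA b2 hmP.2.2
    rcases a1 with he | ⟨hm, hx2, hv2⟩
    · exact absurd he h2.1
    · have : pvSucc x nzB ≤ nz.foldl (pvScanStep x v) (-1) :=
        b3 _ ((hB _).2 ((hA _).1 hm)) hx2
      omega

lemma pvUpdate_inv (sA sB : Int) (nz : PySem.Set Int) (v : List Int)
    (vals : PySem.Dict Int Int) (nzB : List Int) (i d : Int)
    (hs : sA = sB) (hlen : v.length = 100002)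
    (hv : ∀ j : Int, 0 ≤ j → j ≤ 100000 → PySem.List.pyGetD v j 0 = vals.getD j 0)
    (hvmax : PySem.List.pyGetD v 100001 0 = 1)
    (hA : ∀ j, j ∈ nz ↔ pvP v j) (hBs : nzB.Pairwise (· < ·))
    (hB : ∀ j, j ∈ nzB ↔ pvP v j) (hi0 : 0 ≤ i) (hi1 : i ≤ 100000) :
    pvInv
      (sA,
       (if PySem.List.pyGetD (PySem.List.pySetD v i (PySem.List.pyGetD v i 0 + d)) i 0 ≠ 0
          then PySem.Set.add nz i
          else if PySem.Set.contains nz i then (PySem.Set.remove? nz i).getD nz else nz),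
       PySem.List.pySetD v i (PySem.List.pyGetD v i 0 + d))
      (sB, vals.insert i (vals.getD i 0 + d),
       (if vals.getD i 0 = 0 ∧ vals.getD i 0 + d ≠ 0 then pvInsort i nzB
        else if vals.getD i 0 ≠ 0 ∧ vals.getD i 0 + d = 0 then (PySem.List.remove? nzB i).getD nzB
        else nzB)) := by
  have holdeq : vals.getD i 0 = PySem.List.pyGetD v i 0 := (hv i hi0 hi1).symm
  rw [holdeq]
  set old := PySem.List.pyGetD v i 0 with holddef
  set v' := PySem.List.pySetD v i (old + d) with hv'def
  have hvl : ((v.length : Nat) : Int) = 100002 := by rw [hlen]; norm_num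
  have hgetset : ∀ y : Int, 0 ≤ y → y < 100002 →
      PySem.List.pyGetD v' y 0 = if y = i then old + d else PySem.List.pyGetD v y 0 := by
    intro y hy0 hy1
    rw [hv'def, pvGet_set v i y (old + d) hi0 hy0 (by omega)]
  have hvi' : PySem.List.pyGetD v' i 0 = old + d := by
    rw [hgetset i hi0 (by omega), if_pos rfl]
  have hP' : ∀ y, pvP v' y ↔ ((y = i ∧ old + d ≠ 0) ∨ (y ≠ i ∧ pvP v y)) := by
    intro y
    rw [hv'def]
    exact pvP_set v i (old + d) hlen hi0 (by omega) y
  refine ⟨hs, ?_, ?_, ?_, ?_, ?_, ?_⟩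
  · simp only
    rw [hv'def, PySem.List.length_pySetD, hlen]
  · -- values agree
    intro y hy0 hy1
    simp only
    rw [hgetset y hy0 (by omega), PySem.Dict.getD_insert]
    split_ifs with hy
    · rfl
    · exact hv y hy0 hy1
  · -- sentinel cell untouched
    simp only
    rw [hgetset 100001 (by norm_num) (by norm_num), if_neg (by omega), hvmax]
  · -- A's set membership
    intro y
    simp only [hvi']
    rw [hP' y]
    by_cases hnew : old + d ≠ 0
    · rw [if_pos hnew, PySem.Set.mem_add, hA y]
      constructor
      · rintro (hy | rfl)
        · by_cases hyi : y = i
          · exact Or.inl ⟨hyi, hnew⟩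
          · exact Or.inr ⟨hyi, hy⟩
        · exact Or.inl ⟨rfl, hnew⟩
      · rintro (⟨rfl, -⟩ | ⟨-, hy⟩)
        · exact Or.inr rfl
        · exact Or.inl hy
    · rw [if_neg hnew]
      push_neg at hnew
      by_cases hmem : i ∈ nz
      · rw [if_pos ((PySem.Set.contains_iff nz i).2 hmem),
            PySem.Set.remove?_of_mem hmem, Option.getD_some, PySem.Set.mem_discard, hA y]
        constructor
        · rintro ⟨hy, hyne⟩; exact Or.inr ⟨hyne, hy⟩
        · rintro (⟨-, hno⟩ | ⟨hyne, hy⟩)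
          · exact absurd hnew hno
          · exact ⟨hy, hyne⟩
      · rw [if_neg (by simpa [PySem.Set.contains_iff] using hmem), hA y]
        constructor
        · intro hy
          have hyne : y ≠ i := fun he => hmem (he ▸ (hA y).2 hy)
          exact Or.inr ⟨hyne, hy⟩
        · rintro (⟨-, hno⟩ | ⟨-, hy⟩)
          · exact absurd hnew hno
          · exact hy
  · -- B's sorted list stays sorted
    simp only
    by_cases hold : old = 0
    · by_cases hnew : old + d ≠ 0
      · rw [if_pos ⟨hold, hnew⟩]
        have hni : i ∉ nzB := fun hm => ((hB i).1 hm).2.2 (holddef ▸ hold)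
        exact pairwise_pvInsort i nzB hBs hni
      · rw [if_neg (fun hc => hnew hc.2), if_neg (fun hc => hc.1 hold)]
        exact hBs
    · by_cases hnew : old + d = 0
      · rw [if_neg (fun hc => hold hc.1), if_pos ⟨hold, hnew⟩]
        have hmem : i ∈ nzB := (hB i).2 ⟨hi0, by omega, holddef ▸ hold⟩
        rw [PySem.List.remove?_eq_some_erase nzB i hmem, Option.getD_some]
        exact List.Pairwise.sublist (List.erase_sublist) hBs
      · rw [if_neg (fun hc => hold hc.1), if_neg (fun hc => hnew hc.2)]
        exact hBs
  · -- B's sorted list membership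
    intro y
    simp only
    rw [hP' y]
    by_cases hold : old = 0
    · by_cases hnew : old + d ≠ 0
      · rw [if_pos ⟨hold, hnew⟩, mem_pvInsort]
        constructor
        · rintro (rfl | hy)
          · exact Or.inl ⟨rfl, hnew⟩
          · have hpy := (hB y).1 hy
            have hyne : y ≠ i := fun he => hpy.2.2 (by rw [he, ← holddef]; exact hold)
            exact Or.inr ⟨hyne, hpy⟩
        · rintro (⟨rfl, -⟩ | ⟨-, hy⟩)
          · exact Or.inl rfl
          · exact Or.inr ((hB y).2 hy)
      · push_neg at hnew
        rw [if_neg (fun hc => hc.2 hnew), if_neg (fun hc => hc.1 hold), hB y]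
        constructor
        · intro hy
          have hyne : y ≠ i := fun he => hy.2.2 (by rw [he, ← holddef]; exact hold)
          exact Or.inr ⟨hyne, hy⟩
        · rintro (⟨-, hno⟩ | ⟨-, hy⟩)
          · exact absurd hnew hno
          · exact hy
    · by_cases hnew : old + d = 0
      · rw [if_neg (fun hc => hold hc.1), if_pos ⟨hold, hnew⟩]
        have hmem : i ∈ nzB := (hB i).2 ⟨hi0, by omega, holddef ▸ hold⟩
        rw [PySem.List.remove?_eq_some_erase nzB i hmem, Option.getD_some]
        have hnd : nzB.Nodup := hBs.imp (fun hab => ne_of_lt hab)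
        rw [List.Nodup.mem_erase_iff hnd, hB y]
        constructor
        · rintro ⟨hyne, hy⟩; exact Or.inr ⟨hyne, hy⟩
        · rintro (⟨-, hno⟩ | ⟨hyne, hy⟩)
          · exact absurd hnew hno
          · exact ⟨hyne, hy⟩
      · rw [if_neg (fun hc => hold hc.1), if_neg (fun hc => hnew hc.2), hB y]
        constructor
        · intro hy
          by_cases hyi : y = i
          · exact Or.inl ⟨hyi, hnew⟩
          · exact Or.inr ⟨hyi, hy⟩
        · rintro (⟨rfl, -⟩ | ⟨-, hy⟩)
          · exact ⟨hi0, by omega, holddef ▸ hold⟩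
          · exact hy

lemma pvStep_inv (a : Int × PySem.Set Int × List Int) (b : Int × PySem.Dict Int Int × List Int)
    (h : pvInv a b) (q : List Int) (hq : q ≠ [] ∧
      (q.headI = 1 → 3 ≤ q.length ∧ 0 ≤ q.getD 1 0 ∧ q.getD 1 0 ≤ 100000) ∧
      (q.headI = 0 → 2 ≤ q.length)) :
    pvInv (pvStepA a q) (pvStepB b q) := by
  obtain ⟨sA, nz, v⟩ := a
  obtain ⟨sB, vals, nzB⟩ := b
  obtain ⟨hs, hlen, hv, hvmax, hA, hBs, hB⟩ := h
  simp only at hs hlen hv hvmax hA hBs hB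
  obtain ⟨hne, hq1, hq0⟩ := hq
  cases q with
  | nil => exact absurd rfl hne
  | cons c t =>
  simp only [List.headI] at hq1 hq0
  by_cases hc1 : c = 1
  · -- update query
    subst hc1
    obtain ⟨hlen3, hi0, hi1⟩ := hq1 rfl
    have hget1 : PySem.List.pyGetD ((1:Int) :: t) 1 0 = ((1:Int) :: t).getD 1 0 := by
      have := PySem.List.pyGetD_natCast ((1:Int) :: t) 1 0
      simpa using this
    simp only [pvStepA, pvStepB, PySem.List.pyGetD_zero_cons, reduceIte]
    exact pvUpdate_inv sA sB nz v vals nzB _ _ hs hlen hv hvmax hA hBs hB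
      (by rw [hget1]; exact hi0) (by rw [hget1]; exact hi1)
  · by_cases hc0 : c = 0
    · -- sum query
      subst hc0
      simp only [pvStepA, pvStepB, PySem.List.pyGetD_zero_cons, if_neg hc1, reduceIte]
      refine ⟨?_, hlen, hv, hvmax, hA, hBs, hB⟩
      rw [hs, pvScan_eq (PySem.List.pyGetD ((0:Int) :: t) 1 0) v nz nzB hA hBs hB]
    · -- ignored query
      simp only [pvStepA, pvStepB, PySem.List.pyGetD_zero_cons, if_neg hc1, if_neg hc0]
      exact ⟨hs, hlen, hv, hvmax, hA, hBs, hB⟩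

lemma pvFold_inv (qs : List (List Int)) (a : Int × PySem.Set Int × List Int)
    (b : Int × PySem.Dict Int Int × List Int) (h : pvInv a b)
    (hqs : ∀ q ∈ qs, q ≠ [] ∧
      (q.headI = 1 → 3 ≤ q.length ∧ 0 ≤ q.getD 1 0 ∧ q.getD 1 0 ≤ 100000) ∧
      (q.headI = 0 → 2 ≤ q.length)) :
    pvInv (qs.foldl pvStepA a) (qs.foldl pvStepB b) := by
  induction qs generalizing a b with
  | nil => simpa using h
  | cons q t ih =>
    simp only [List.foldl_cons]
    exact ih _ _ (pvStep_inv a b h q (hqs q (by simp)))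
      (fun q' hq' => hqs q' (by simp [hq']))

lemma pvInit_gen (v0 : List Int) (hrl : v0.length = 100002)
    (h0 : ∀ j : Int, 0 ≤ j → j ≤ 100000 → PySem.List.pyGetD v0 j 0 = 0)
    (h1 : PySem.List.pyGetD v0 100001 0 = 1) :
    pvInv (0, PySem.Set.ofList [100001], v0) (0, PySem.Dict.empty, [100001]) := by
  have hP : ∀ y, pvP v0 y ↔ y = 100001 := by
    intro y
    unfold pvP
    constructor
    · rintro ⟨a, b, c⟩
      by_contra hne
      exact c (h0 y a (by omega))
    · rintro rfl
      exact ⟨by norm_num, le_refl _, by rw [h1]; norm_num⟩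
  refine ⟨rfl, hrl, ?_, h1, ?_, ?_, ?_⟩
  · intro j hj0 hj1
    rw [h0 j hj0 hj1, PySem.Dict.getD_empty]
  · intro i
    show i ∈ PySem.Set.ofList [100001] ↔ pvP v0 i
    rw [PySem.Set.mem_ofList, hP i]
    simp
  · show List.Pairwise (· < ·) [(100001 : Int)]
    simp
  · intro i
    show i ∈ [(100001 : Int)] ↔ pvP v0 i
    rw [hP i]
    simp

set_option maxRecDepth 10000 in
lemma pvInit_inv : pvInv (0, PySem.Set.ofList [100001], PySem.List.pySetD (List.replicate 100002 0) 100001 1)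
    (0, PySem.Dict.empty, [100001]) := by
  have hrl : (List.replicate 100002 (0:Int)).length = 100002 := List.length_replicate
  have hget : ∀ j : Int, 0 ≤ j → j ≤ 100001 →
      PySem.List.pyGetD (List.replicate 100002 (0:Int)) j 0 = 0 := by
    intro j hj0 hj1
    rw [PySem.List.pyGetD_eq_getElem _ 0 hj0 (by rw [hrl]; omega), List.getElem_replicate]
  apply pvInit_gen
  · rw [PySem.List.length_pySetD, hrl]
  · intro j hj0 hj1
    rw [pvGet_set _ _ _ _ (by norm_num) hj0 (by rw [hrl]; omega), if_neg (by omega)]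
    exact hget j hj0 (by omega)
  · rw [pvGet_set _ _ _ _ (by norm_num) (by norm_num) (by rw [hrl]; omega), if_pos rfl]

-- ===== VERDICT (by name: the statement is the Claim_ definition above) =====
theorem snowClearing_spec : Claim_equal_snowClearing := by
  intro queries _ hpre
  show _ = _
  unfold snowClearing snowClearing_alt
  exact (pvFold_inv queries _ _ pvInit_inv hpre).1
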